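-- pv_equiv track=rewrite | github.com/lst016/psd-smart-cut | skills/psd-parser/level5-export/asset_exporter.py | _expand_render_targets
-- ===== SOURCE A (Python) =====
-- from typing import Any, Dict, List, Optional, Set, Tuple
--
-- def _expand_render_targets(
--
--     layer_ids: List[str],
--     layer_map: Dict[str, Dict[str, Any]],
-- ) -> Set[str]:
--     expanded: Set[str] = set()
--
--     def walk(target_id: str) -> None:
--         if target_id in expanded or target_id not in layer_map:
--             return
--         expanded.add(target_id)
--         for child_id in layer_map[target_id].get("children", []):
--             walk(child_id)
--
--     for layer_id in layer_ids:
--         walk(layer_id)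
--     return expanded
-- ===== SOURCE B (Python) =====
-- from typing import Any, Dict, List, Set
--
--
-- def _expand_render_targets(
--     layer_ids: List[str],
--     layer_map: Dict[str, Dict[str, Any]],
-- ) -> Set[str]:
--     expanded: Set[str] = set()
--     stack = list(reversed(layer_ids))
--     while stack:
--         tid = stack.pop()
--         if tid in expanded or tid not in layer_map:
--             continue
--         expanded.add(tid)
--         stack.extend(reversed(layer_map[tid].get("children", [])))
--     return expanded
-- ===== Notes on version B (the rewrite author's own statement) =====
-- stated objective: idiomatic
-- what changed: Replaced the recursive nested-closure walk with an explicit-stack iterative DFS (visited/missing guard applied at pop time), avoiding Python recursion-depth limits on deep trees.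
import Mathlib
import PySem

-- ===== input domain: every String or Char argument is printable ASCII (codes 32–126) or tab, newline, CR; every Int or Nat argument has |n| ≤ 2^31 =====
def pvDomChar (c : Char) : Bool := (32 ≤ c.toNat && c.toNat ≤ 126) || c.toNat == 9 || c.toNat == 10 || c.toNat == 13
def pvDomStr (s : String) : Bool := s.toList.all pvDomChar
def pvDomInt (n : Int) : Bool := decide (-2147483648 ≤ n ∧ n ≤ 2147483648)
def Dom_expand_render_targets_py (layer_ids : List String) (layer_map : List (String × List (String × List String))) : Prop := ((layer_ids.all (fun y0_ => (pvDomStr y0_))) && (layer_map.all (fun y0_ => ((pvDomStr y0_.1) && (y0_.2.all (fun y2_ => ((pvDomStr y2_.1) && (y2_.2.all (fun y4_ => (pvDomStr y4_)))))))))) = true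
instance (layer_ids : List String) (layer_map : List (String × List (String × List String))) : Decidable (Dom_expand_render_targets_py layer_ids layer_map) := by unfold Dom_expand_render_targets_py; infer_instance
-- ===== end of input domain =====

-- B replaces A's recursive nested walk by an explicit-stack iterative DFS (idiomatic; avoids
-- Python recursion-depth limits); same visited-set result, port orders made to coincide by
-- pushing children reversed. Both return a Python set (PySem.Set String).

-- ===== PORT A =====

-- `layer_map[t].get("children", [])` (and [] when t is absent, used only under the guard)
def pvChildren (layer_map : List (String × List (String × List String))) (t : String) : List String :=
  match PySem.Dict.get? (PySem.Dict.mk layer_map) t with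
  | some d => PySem.Dict.getD (PySem.Dict.mk d) "children" []
  | none => []

-- A's recursive `walk`, with fuel only to make the recursion total; layer_map.length + 1 fuel
-- always suffices (each recursion level adds one unvisited key to `expanded`).
def pvWalkA (layer_map : List (String × List (String × List String))) :
    Nat → List String → String → List String
  | 0, expanded, _ => expanded
  | Nat.succ f, expanded, t =>
    if expanded.contains t || !(PySem.Dict.contains (PySem.Dict.mk layer_map) t) then expanded
    else List.foldl (pvWalkA layer_map f) (PySem.Set.add expanded t) (pvChildren layer_map t)

def expand_render_targets_py (layer_ids : List String) (layer_map : List (String × List (String × List String))) : List String :=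
  layer_ids.foldl (fun expanded layer_id => pvWalkA layer_map (layer_map.length + 1) expanded layer_id) []

-- ===== PORT B =====

-- number of keys of layer_map not yet in the visited set (termination measure for the loop)
def pvUnvisited (layer_map : List (String × List (String × List String))) (s : List String) : Nat :=
  ((layer_map.map Prod.fst).filter (fun k => !s.contains k)).length

theorem pvUnvisited_add_lt (layer_map : List (String × List (String × List String)))
    (s : List String) (t : String) (h1 : s.contains t = false)
    (h2 : PySem.Dict.contains (PySem.Dict.mk layer_map) t = true) :
    pvUnvisited layer_map (s ++ [t]) < pvUnvisited layer_map s := by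
  have hkey : t ∈ layer_map.map Prod.fst := by
    simp only [PySem.Dict.contains, List.any_eq_true] at h2
    obtain ⟨p, hp, hpt⟩ := h2
    exact List.mem_map.mpr ⟨p, hp, by simpa using hpt⟩
  unfold pvUnvisited
  have hsub : ((layer_map.map Prod.fst).filter (fun k => !(s ++ [t]).contains k)).Sublist
      ((layer_map.map Prod.fst).filter (fun k => !s.contains k)) := by
    apply List.monotone_filter_right
    intro a ha
    simp only [List.contains_append, Bool.not_eq_eq_eq_not, Bool.not_true, Bool.or_eq_false_iff] at ha ⊢
    exact ha.1
  rcases Nat.lt_or_ge ((layer_map.map Prod.fst).filter (fun k => !(s ++ [t]).contains k)).length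
      ((layer_map.map Prod.fst).filter (fun k => !s.contains k)).length with h | h
  · exact h
  · exfalso
    have heq := hsub.eq_of_length (Nat.le_antisymm hsub.length_le h)
    have htin : t ∈ (layer_map.map Prod.fst).filter (fun k => !s.contains k) := by
      simp only [List.mem_filter, h1]
      exact ⟨hkey, rfl⟩
    rw [← heq] at htin
    simp [List.mem_filter] at htin

-- B's while-loop over an explicit stack; the Lean stack holds its top FIRST (the Python list
-- holds it last), so `stack.extend(reversed(children))` is `children ++ stack` here.
def pvLoopB (layer_map : List (String × List (String × List String))) :
    List String → List String → List String
  | expanded, [] => expanded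
  | expanded, t :: stack =>
    if h : expanded.contains t || !(PySem.Dict.contains (PySem.Dict.mk layer_map) t) then
      pvLoopB layer_map expanded stack
    else
      pvLoopB layer_map (PySem.Set.add expanded t) (pvChildren layer_map t ++ stack)
termination_by expanded stack => (pvUnvisited layer_map expanded, stack.length)
decreasing_by
  · exact Prod.Lex.right _ (Nat.lt_succ_self _)
  · apply Prod.Lex.left
    simp only [Bool.or_eq_true, Bool.not_eq_true', not_or] at h
    have h1 : expanded.contains t = false := by simpa using h.1
    have h2 : PySem.Dict.contains (PySem.Dict.mk layer_map) t = true := by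
      have := h.2; simpa using this
    have : PySem.Set.add expanded t = expanded ++ [t] := by
      unfold PySem.Set.add
      rw [PySem.Set.contains_eq_listContains, h1]
      simp
    rw [this]
    exact pvUnvisited_add_lt layer_map expanded t h1 h2

def expand_render_targets_py_alt (layer_ids : List String) (layer_map : List (String × List (String × List String))) : List String :=
  pvLoopB layer_map [] layer_ids

-- ===== PRECONDITION & SPEC =====
def Spec_expand_render_targets_py (layer_ids : List String) (layer_map : List (String × List (String × List String))) (out : List String) : Prop := out = expand_render_targets_py_alt layer_ids layer_map
instance (layer_ids : List String) (layer_map : List (String × List (String × List String))) (out : List String) : Decidable (Spec_expand_render_targets_py layer_ids layer_map out) := by unfold Spec_expand_render_targets_py; infer_instance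

-- ===== CLAIM (what is proved, stated in full; the proofs are below) =====
def Claim_equal_expand_render_targets_py : Prop := ∀ (layer_ids : List String) (layer_map : List (String × List (String × List String))), Dom_expand_render_targets_py layer_ids layer_map → Spec_expand_render_targets_py layer_ids layer_map (expand_render_targets_py layer_ids layer_map)

-- ===== LEMMAS AND PROOFS =====

-- pvWalkA only appends to its state
theorem pvWalkA_prefix (layer_map : List (String × List (String × List String))) :
    ∀ (f : Nat) (s : List String) (t : String), ∃ d, pvWalkA layer_map f s t = s ++ d := by
  intro f
  induction f with
  | zero => intro s t; exact ⟨[], by simp [pvWalkA]⟩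
  | succ f ih =>
    intro s t
    by_cases hg : (s.contains t || !(PySem.Dict.contains (PySem.Dict.mk layer_map) t)) = true
    · refine ⟨[], ?_⟩
      show pvWalkA layer_map (Nat.succ f) s t = s ++ []
      simp only [pvWalkA]
      rw [if_pos hg, List.append_nil]
    · have hrec : ∀ (cs : List String) (s0 : List String),
          ∃ d, List.foldl (pvWalkA layer_map f) s0 cs = s0 ++ d := by
        intro cs
        induction cs with
        | nil => intro s0; exact ⟨[], by simp⟩
        | cons c cs ihc =>
          intro s0
          obtain ⟨d1, hd1⟩ := ih s0 c
          obtain ⟨d2, hd2⟩ := ihc (pvWalkA layer_map f s0 c)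
          refine ⟨d1 ++ d2, ?_⟩
          simp only [List.foldl_cons]
          rw [hd2, hd1, List.append_assoc]
      obtain ⟨d, hd⟩ := hrec (pvChildren layer_map t) (PySem.Set.add s t)
      by_cases hc : s.contains t = true
      · exfalso
        apply hg
        rw [hc, Bool.true_or]
      · rw [Bool.not_eq_true] at hc
        refine ⟨t :: d, ?_⟩
        show pvWalkA layer_map (Nat.succ f) s t = s ++ t :: d
        simp only [pvWalkA]
        rw [if_neg hg, hd]
        unfold PySem.Set.add
        rw [PySem.Set.contains_eq_listContains, hc]
        simp

theorem pvUnvisited_append_le (layer_map : List (String × List (String × List String)))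
    (s d : List String) : pvUnvisited layer_map (s ++ d) ≤ pvUnvisited layer_map s := by
  unfold pvUnvisited
  apply List.Sublist.length_le
  apply List.monotone_filter_right
  intro a ha
  simp only [List.contains_append, Bool.not_eq_eq_eq_not, Bool.not_true, Bool.or_eq_false_iff] at ha ⊢
  exact ha.1

theorem pvUnvisited_le (layer_map : List (String × List (String × List String)))
    (s : List String) : pvUnvisited layer_map s ≤ layer_map.length := by
  unfold pvUnvisited
  calc ((layer_map.map Prod.fst).filter _).length ≤ (layer_map.map Prod.fst).length :=
        List.length_filter_le _ _
    _ = layer_map.length := List.length_map ..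

-- when no key of layer_map is unvisited, A's guard fires for every target
theorem pvGuard_of_unvisited_zero (layer_map : List (String × List (String × List String)))
    (s : List String) (t : String) (h : pvUnvisited layer_map s = 0) :
    (s.contains t || !(PySem.Dict.contains (PySem.Dict.mk layer_map) t)) = true := by
  by_cases hc : PySem.Dict.contains (PySem.Dict.mk layer_map) t = true
  · have hkey : t ∈ layer_map.map Prod.fst := by
      simp only [PySem.Dict.contains, List.any_eq_true] at hc
      obtain ⟨p, hp, hpt⟩ := hc
      exact List.mem_map.mpr ⟨p, hp, by simpa using hpt⟩
    have hfil : (layer_map.map Prod.fst).filter (fun k => !s.contains k) = [] :=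
      List.length_eq_zero_iff.mp h
    have hts : s.contains t = true := by
      by_contra hns
      rw [Bool.not_eq_true] at hns
      have hmem : t ∈ (layer_map.map Prod.fst).filter (fun k => !s.contains k) := by
        refine List.mem_filter.mpr ⟨hkey, ?_⟩
        rw [hns]
        rfl
      rw [hfil] at hmem
      exact absurd hmem (List.not_mem_nil)
    rw [hts, Bool.true_or]
  · simp [Bool.eq_false_iff.mpr hc]

-- fuel irrelevance: any two fuels at least the number of unvisited keys give the same walk
theorem pvWalkA_stable (layer_map : List (String × List (String × List String))) :
    ∀ (f g : Nat) (s : List String) (t : String),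
      pvUnvisited layer_map s ≤ f → pvUnvisited layer_map s ≤ g →
      pvWalkA layer_map f s t = pvWalkA layer_map g s t := by
  intro f
  induction f with
  | zero =>
    intro g s t hf hg
    have h0 : pvUnvisited layer_map s = 0 := Nat.le_zero.mp hf
    have hgu := pvGuard_of_unvisited_zero layer_map s t h0
    cases g with
    | zero => rfl
    | succ g =>
      show pvWalkA layer_map 0 s t = pvWalkA layer_map (Nat.succ g) s t
      simp only [pvWalkA]
      rw [if_pos hgu]
  | succ f ih =>
    intro g s t hf hg
    cases g with
    | zero =>
      have h0 : pvUnvisited layer_map s = 0 := Nat.le_zero.mp hg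
      have hgu := pvGuard_of_unvisited_zero layer_map s t h0
      show pvWalkA layer_map (Nat.succ f) s t = pvWalkA layer_map 0 s t
      simp only [pvWalkA]
      rw [if_pos hgu]
    | succ g =>
      by_cases hgu : (s.contains t || !(PySem.Dict.contains (PySem.Dict.mk layer_map) t)) = true
      · show pvWalkA layer_map (Nat.succ f) s t = pvWalkA layer_map (Nat.succ g) s t
        simp only [pvWalkA]
        rw [if_pos hgu, if_pos hgu]
      · show pvWalkA layer_map (Nat.succ f) s t = pvWalkA layer_map (Nat.succ g) s t
        simp only [pvWalkA]
        rw [if_neg hgu, if_neg hgu]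
        -- the new state has strictly fewer unvisited keys
        have h1 : s.contains t = false := by
          rcases Bool.or_eq_false_iff.mp (Bool.eq_false_iff.mpr hgu) with ⟨h1, _⟩
          exact h1
        have h2 : PySem.Dict.contains (PySem.Dict.mk layer_map) t = true := by
          rcases Bool.or_eq_false_iff.mp (Bool.eq_false_iff.mpr hgu) with ⟨_, h2⟩
          simpa using h2
        have hadd : PySem.Set.add s t = s ++ [t] := by
          unfold PySem.Set.add
          rw [PySem.Set.contains_eq_listContains, h1]
          simp
        have hlt : pvUnvisited layer_map (PySem.Set.add s t) < pvUnvisited layer_map s := by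
          rw [hadd]; exact pvUnvisited_add_lt layer_map s t h1 h2
        have hf' : pvUnvisited layer_map (PySem.Set.add s t) ≤ f := by omega
        have hg' : pvUnvisited layer_map (PySem.Set.add s t) ≤ g := by omega
        -- fold over the children, states only grow
        have hfold : ∀ (cs : List String) (s0 : List String),
            pvUnvisited layer_map s0 ≤ f → pvUnvisited layer_map s0 ≤ g →
            List.foldl (pvWalkA layer_map f) s0 cs = List.foldl (pvWalkA layer_map g) s0 cs := by
          intro cs
          induction cs with
          | nil => intro s0 _ _; rfl
          | cons c cs ihc =>
            intro s0 hs0f hs0g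
            simp only [List.foldl_cons]
            rw [← ih g s0 c hs0f hs0g]
            obtain ⟨d, hd⟩ := pvWalkA_prefix layer_map f s0 c
            have hle : pvUnvisited layer_map (pvWalkA layer_map f s0 c) ≤ pvUnvisited layer_map s0 := by
              rw [hd]; exact pvUnvisited_append_le layer_map s0 d
            exact ihc (pvWalkA layer_map f s0 c) (le_trans hle hs0f) (le_trans hle hs0g)
        exact hfold (pvChildren layer_map t) (PySem.Set.add s t) hf' hg'

-- the iterative DFS consumes its stack exactly as A's walk consumes a root list
theorem pvLoopB_eq_foldl (layer_map : List (String × List (String × List String))) :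
    ∀ (expanded stack : List String),
      pvLoopB layer_map expanded stack =
        stack.foldl (pvWalkA layer_map (layer_map.length + 1)) expanded := by
  intro expanded stack
  fun_induction pvLoopB layer_map expanded stack with
  | case1 expanded => rfl
  | case2 expanded t stack hgu ih =>
    simp only [List.foldl_cons]
    rw [ih]
    have : pvWalkA layer_map (layer_map.length + 1) expanded t = expanded := by
      show pvWalkA layer_map (Nat.succ layer_map.length) expanded t = expanded
      simp only [pvWalkA]
      rw [if_pos hgu]
    rw [this]
  | case3 expanded t stack hgu ih =>
    simp only [List.foldl_cons]
    rw [ih, List.foldl_append]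
    have hstep : pvWalkA layer_map (layer_map.length + 1) expanded t =
        List.foldl (pvWalkA layer_map (layer_map.length + 1)) (PySem.Set.add expanded t)
          (pvChildren layer_map t) := by
      have hne : ¬ (expanded.contains t || !(PySem.Dict.contains (PySem.Dict.mk layer_map) t)) = true := hgu
      show pvWalkA layer_map (Nat.succ layer_map.length) expanded t = _
      simp only [pvWalkA, hne, if_false]
      -- re-fuel the children fold from layer_map.length to layer_map.length + 1
      have hfold : ∀ (cs : List String) (s0 : List String),
          List.foldl (pvWalkA layer_map layer_map.length) s0 cs =
            List.foldl (pvWalkA layer_map (layer_map.length + 1)) s0 cs := by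
        intro cs
        induction cs with
        | nil => intro s0; rfl
        | cons c cs ihc =>
          intro s0
          simp only [List.foldl_cons]
          rw [pvWalkA_stable layer_map layer_map.length (layer_map.length + 1) s0 c
              (pvUnvisited_le layer_map s0) (le_trans (pvUnvisited_le layer_map s0) (Nat.le_succ _))]
          rw [ihc]
      exact hfold (pvChildren layer_map t) (PySem.Set.add expanded t)
    rw [hstep]

-- ===== VERDICT (by name: the statement is the Claim_ definition above) =====
theorem expand_render_targets_py_spec : Claim_equal_expand_render_targets_py := by
  intro layer_ids layer_map _
  show expand_render_targets_py layer_ids layer_map = expand_render_targets_py_alt layer_ids layer_map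
  unfold expand_render_targets_py expand_render_targets_py_alt
  rw [pvLoopB_eq_foldl]
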